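-- pv_equiv track=rewrite | github.com/SIE-Lab-kr/SitVLM2Drive | multivlm-drive-vqa/src/utils/Generating QA/QA.py | categorize_turn_signs
-- ===== SOURCE A (Python) =====
-- def categorize_turn_signs(objects):
--     """
--     Returns two sets: prohibited_turns and allowed_turns.
--     """
--     prohibited_turns = set()
--     allowed_turns = set()
--     for obj_id, obj_info in objects:
--         label = obj_info.get("obj_name", "").strip().lower()
--         if label in ["ts_no_u_turn", "ts_no_left_turn", "ts_no_right_turn", "ts_no_left_u_turn"]:
--             if "no_u_turn" in label:
--                 prohibited_turns.add("No u-turn")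
--             if "no_left_turn" in label:
--                 prohibited_turns.add("No left")
--             if "no_right_turn" in label:
--                 prohibited_turns.add("No right")
--             if "ts_no_left_u_turn" in label:
--                 prohibited_turns.add("No Left U-Turn")
--         elif label in ["ts_only_left_turn", "ts_only_right_turn", "ts_only_u_turn"]:
--             if "only_left_turn" in label:
--                 allowed_turns.add("left")
--             if "only_right_turn" in label:
--                 allowed_turns.add("right")
--             if "only_u_turn" in label:
--                 allowed_turns.add("u-turn")
--     return prohibited_turns, allowed_turns
-- ===== SOURCE B (Python) =====
-- PROHIBITED = {
--     "ts_no_u_turn": "No u-turn",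
--     "ts_no_left_turn": "No left",
--     "ts_no_right_turn": "No right",
--     "ts_no_left_u_turn": "No Left U-Turn",
-- }
-- ALLOWED = {
--     "ts_only_left_turn": "left",
--     "ts_only_right_turn": "right",
--     "ts_only_u_turn": "u-turn",
-- }
--
--
-- def categorize_turn_signs(objects):
--     """
--     Returns two sets: prohibited_turns and allowed_turns.
--     """
--     labels = [info.get("obj_name", "").strip().lower() for _, info in objects]
--     prohibited_turns = {PROHIBITED[l] for l in labels if l in PROHIBITED}
--     allowed_turns = {ALLOWED[l] for l in labels if l in ALLOWED}
--     return prohibited_turns, allowed_turns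
-- ===== Notes on version B (the rewrite author's own statement) =====
-- stated objective: simpler
-- what changed: Replaced A's single loop with interleaved branch chains and substring-test cascades by staged passes: one pass normalizing all labels, then two independent set comprehensions over that list driven by two flat label-to-string tables (one per output set).
import Mathlib
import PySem

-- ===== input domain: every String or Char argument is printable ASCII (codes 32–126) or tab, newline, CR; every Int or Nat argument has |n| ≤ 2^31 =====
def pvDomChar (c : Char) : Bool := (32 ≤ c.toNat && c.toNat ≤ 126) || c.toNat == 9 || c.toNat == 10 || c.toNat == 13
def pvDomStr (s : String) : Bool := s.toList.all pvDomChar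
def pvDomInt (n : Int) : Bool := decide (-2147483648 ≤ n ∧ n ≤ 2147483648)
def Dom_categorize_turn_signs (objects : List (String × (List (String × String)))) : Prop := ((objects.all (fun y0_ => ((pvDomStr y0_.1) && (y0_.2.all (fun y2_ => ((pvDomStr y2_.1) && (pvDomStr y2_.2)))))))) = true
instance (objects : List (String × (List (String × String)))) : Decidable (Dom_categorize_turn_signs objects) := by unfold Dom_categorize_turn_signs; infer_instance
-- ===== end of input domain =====

-- B replaces A's single loop of nested branch chains by staged passes: normalize all labels once, then build each set independently from a flat label→string table (objective: simpler).

-- ===== PORT A =====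
-- one iteration of A's for-loop: membership guard, then the substring-test cascade
def pvAStep (acc : PySem.Set String × PySem.Set String) (obj : String × List (String × String)) :
    PySem.Set String × PySem.Set String :=
  let label := PySem.Str.lower (PySem.Str.strip (PySem.Dict.getD (PySem.Dict.mk obj.2) "obj_name" ""))
  if label ∈ ["ts_no_u_turn", "ts_no_left_turn", "ts_no_right_turn", "ts_no_left_u_turn"] then
    let p := acc.1
    let p := if PySem.Str.isIn "no_u_turn" label then PySem.Set.add p "No u-turn" else p
    let p := if PySem.Str.isIn "no_left_turn" label then PySem.Set.add p "No left" else p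
    let p := if PySem.Str.isIn "no_right_turn" label then PySem.Set.add p "No right" else p
    let p := if PySem.Str.isIn "ts_no_left_u_turn" label then PySem.Set.add p "No Left U-Turn" else p
    (p, acc.2)
  else if label ∈ ["ts_only_left_turn", "ts_only_right_turn", "ts_only_u_turn"] then
    let a := acc.2
    let a := if PySem.Str.isIn "only_left_turn" label then PySem.Set.add a "left" else a
    let a := if PySem.Str.isIn "only_right_turn" label then PySem.Set.add a "right" else a
    let a := if PySem.Str.isIn "only_u_turn" label then PySem.Set.add a "u-turn" else a
    (acc.1, a)
  else acc

def categorize_turn_signs (objects : List (String × (List (String × String)))) : List String × List String :=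
  objects.foldl pvAStep (PySem.Set.empty, PySem.Set.empty)

-- ===== PORT B =====
def pvProhibited : PySem.Dict String String :=
  PySem.Dict.mk [("ts_no_u_turn", "No u-turn"),
   ("ts_no_left_turn", "No left"),
   ("ts_no_right_turn", "No right"),
   ("ts_no_left_u_turn", "No Left U-Turn")]

def pvAllowed : PySem.Dict String String :=
  PySem.Dict.mk [("ts_only_left_turn", "left"),
   ("ts_only_right_turn", "right"),
   ("ts_only_u_turn", "u-turn")]

-- a set comprehension {T[l] for l in labels if l in T}, built left to right
def pvSetComp (table : PySem.Dict String String) (labels : List String) : PySem.Set String :=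
  labels.foldl (fun s l =>
    match PySem.Dict.get? table l with
    | some v => PySem.Set.add s v
    | none => s) PySem.Set.empty

def categorize_turn_signs_alt (objects : List (String × (List (String × String)))) : List String × List String :=
  let labels := objects.map (fun obj =>
    PySem.Str.lower (PySem.Str.strip (PySem.Dict.getD (PySem.Dict.mk obj.2) "obj_name" "")))
  (pvSetComp pvProhibited labels, pvSetComp pvAllowed labels)

-- ===== PRECONDITION & SPEC =====
def Spec_categorize_turn_signs (objects : List (String × (List (String × String)))) (out : List String × List String) : Prop := out = categorize_turn_signs_alt objects
instance (objects : List (String × (List (String × String)))) (out : List String × List String) : Decidable (Spec_categorize_turn_signs objects out) := by unfold Spec_categorize_turn_signs; infer_instance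

-- ===== CLAIM (what is proved, stated in full; the proofs are below) =====
def Claim_equal_categorize_turn_signs : Prop := ∀ (objects : List (String × (List (String × String)))), Dom_categorize_turn_signs objects → Spec_categorize_turn_signs objects (categorize_turn_signs objects)

-- ===== LEMMAS AND PROOFS =====

-- B's two per-label comprehension steps, named for the proof
def pvPStep (s : PySem.Set String) (l : String) : PySem.Set String :=
  match PySem.Dict.get? pvProhibited l with
  | some v => PySem.Set.add s v
  | none => s

def pvAlStep (s : PySem.Set String) (l : String) : PySem.Set String :=
  match PySem.Dict.get? pvAllowed l with
  | some v => PySem.Set.add s v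
  | none => s

-- A's loop body acts on the two accumulators exactly as B's two table steps do
theorem pvStep_eq (p a : PySem.Set String) (obj : String × List (String × String)) :
    pvAStep (p, a) obj =
      (pvPStep p (PySem.Str.lower (PySem.Str.strip (PySem.Dict.getD (PySem.Dict.mk obj.2) "obj_name" ""))),
       pvAlStep a (PySem.Str.lower (PySem.Str.strip (PySem.Dict.getD (PySem.Dict.mk obj.2) "obj_name" "")))) := by
  unfold pvAStep pvPStep pvAlStep
  set label := PySem.Str.lower (PySem.Str.strip (PySem.Dict.getD (PySem.Dict.mk obj.2) "obj_name" "")) with hl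
  clear_value label
  by_cases h1 : label = "ts_no_u_turn"; · subst h1; rfl
  by_cases h2 : label = "ts_no_left_turn"; · subst h2; rfl
  by_cases h3 : label = "ts_no_right_turn"; · subst h3; rfl
  by_cases h4 : label = "ts_no_left_u_turn"; · subst h4; rfl
  by_cases h5 : label = "ts_only_left_turn"; · subst h5; rfl
  by_cases h6 : label = "ts_only_right_turn"; · subst h6; rfl
  by_cases h7 : label = "ts_only_u_turn"; · subst h7; rfl
  have g1 : ("ts_no_u_turn" == label) = false := beq_eq_false_iff_ne.mpr (Ne.symm h1)
  have g2 : ("ts_no_left_turn" == label) = false := beq_eq_false_iff_ne.mpr (Ne.symm h2)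
  have g3 : ("ts_no_right_turn" == label) = false := beq_eq_false_iff_ne.mpr (Ne.symm h3)
  have g4 : ("ts_no_left_u_turn" == label) = false := beq_eq_false_iff_ne.mpr (Ne.symm h4)
  have g5 : ("ts_only_left_turn" == label) = false := beq_eq_false_iff_ne.mpr (Ne.symm h5)
  have g6 : ("ts_only_right_turn" == label) = false := beq_eq_false_iff_ne.mpr (Ne.symm h6)
  have g7 : ("ts_only_u_turn" == label) = false := beq_eq_false_iff_ne.mpr (Ne.symm h7)
  simp [PySem.Dict.get?, pvProhibited, pvAllowed, List.find?,
        h1, h2, h3, h4, h5, h6, h7, g1, g2, g3, g4, g5, g6, g7]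

-- A's interleaved fold over objects splits into B's two independent folds over the normalized labels
theorem pvFold_split (objects : List (String × (List (String × String))))
    (p a : PySem.Set String) :
    objects.foldl pvAStep (p, a) =
      ((objects.map (fun obj =>
          PySem.Str.lower (PySem.Str.strip (PySem.Dict.getD (PySem.Dict.mk obj.2) "obj_name" "")))).foldl pvPStep p,
       (objects.map (fun obj =>
          PySem.Str.lower (PySem.Str.strip (PySem.Dict.getD (PySem.Dict.mk obj.2) "obj_name" "")))).foldl pvAlStep a) := by
  induction objects generalizing p a with
  | nil => rfl
  | cons o rest ih =>
    simp only [List.foldl, List.map, pvStep_eq]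
    exact ih _ _

-- ===== VERDICT (by name: the statement is the Claim_ definition above) =====
theorem categorize_turn_signs_spec : Claim_equal_categorize_turn_signs := by
  intro objects _
  unfold Spec_categorize_turn_signs categorize_turn_signs categorize_turn_signs_alt pvSetComp
  exact pvFold_split objects _ _
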